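-- pv_equiv track=rewrite | github.com/PosoSAgapo/NER-with-EEG-and-ET | sentence_annotation.py | convert_to_sentence_level
-- ===== SOURCE A (Python) =====
-- def convert_to_sentence_level(word_level_data:list):
--     """
--     Args:
--         Words and corresponding NER labels in CoNLL 2003 format on word level (flattened list)
--     Return:
--         Words and corresponding NER labels chunked into sentences (nested list, nested list)
--     """
--     sents, labels = [], []
--     cum_sentlen = 0
--     for i, (word, label) in enumerate(word_level_data):
--         if word == '' and label == '':
--             sent_len = i - cum_sentlen
--             sents.append(list(map(lambda wl: wl[0], word_level_data[cum_sentlen: cum_sentlen + sent_len + 1])))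
--             labels.append(list(map(lambda wl: wl[1], word_level_data[cum_sentlen: cum_sentlen + sent_len + 1])))
--             sent_len = len(sents[-1])
--             cum_sentlen += sent_len
--     return sents, labels
-- ===== SOURCE B (Python) =====
-- def convert_to_sentence_level(word_level_data: list):
--     """Single-pass accumulator version: no index cursor, no re-slicing."""
--     sents, labels = [], []
--     cur_w, cur_l = [], []
--     for word, label in word_level_data:
--         cur_w.append(word)
--         cur_l.append(label)
--         if word == '' and label == '':
--             sents.append(cur_w)
--             labels.append(cur_l)
--             cur_w, cur_l = [], []
--     return sents, labels
-- ===== Notes on version B (the rewrite author's own statement) =====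
-- stated objective: simpler
-- what changed: Replaced the index-cursor strategy (tracking cum_sentlen and re-slicing/re-mapping the whole list twice per sentence) by one pass that threads two per-sentence accumulator buffers and flushes them at each empty separator.
import Mathlib
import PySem

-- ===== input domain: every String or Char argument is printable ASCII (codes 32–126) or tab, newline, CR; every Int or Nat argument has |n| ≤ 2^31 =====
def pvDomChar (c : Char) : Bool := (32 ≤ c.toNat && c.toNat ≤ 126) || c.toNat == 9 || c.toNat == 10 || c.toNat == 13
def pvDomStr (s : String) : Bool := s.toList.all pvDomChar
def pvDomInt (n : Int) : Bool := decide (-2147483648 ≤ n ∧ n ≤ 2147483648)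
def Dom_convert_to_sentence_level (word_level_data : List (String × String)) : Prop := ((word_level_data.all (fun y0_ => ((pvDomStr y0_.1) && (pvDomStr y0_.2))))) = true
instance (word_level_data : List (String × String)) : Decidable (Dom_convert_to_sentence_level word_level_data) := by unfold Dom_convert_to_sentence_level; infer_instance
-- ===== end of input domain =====

-- B replaces A's cum_sentlen index cursor and per-sentence re-slicing of the whole list
-- by a single pass threading two per-sentence accumulator buffers (objective: simpler).

-- ===== PORT A =====
-- loop body of A: state = (sents, labels, cum_sentlen)
def pvStepA (d : List (String × String))
    (acc : List (List String) × List (List String) × Int)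
    (p : Int × (String × String)) : List (List String) × List (List String) × Int :=
  let sents := acc.1
  let labels := acc.2.1
  let cum_sentlen := acc.2.2
  if p.2.1 = "" ∧ p.2.2 = "" then
    let sent_len := p.1 - cum_sentlen
    let sents' := sents ++ [(PySem.List.slice d (some cum_sentlen) (some (cum_sentlen + sent_len + 1))).map Prod.fst]
    let labels' := labels ++ [(PySem.List.slice d (some cum_sentlen) (some (cum_sentlen + sent_len + 1))).map Prod.snd]
    -- sent_len = len(sents[-1]); sents' was just appended to, so pyGet? … (-1) is some
    let sent_len2 : Int := (((PySem.List.pyGet? sents' (-1)).getD []).length : Int)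
    (sents', labels', cum_sentlen + sent_len2)
  else
    (sents, labels, cum_sentlen)

def convert_to_sentence_level (word_level_data : List (String × String)) : List (List String) × List (List String) :=
  let fin := (PySem.List.enumerate word_level_data).foldl (pvStepA word_level_data) ([], [], 0)
  (fin.1, fin.2.1)

-- ===== PORT B =====
-- loop body of B: state = (sents, labels, cur_w, cur_l)
def pvStepB (acc : List (List String) × List (List String) × List String × List String)
    (wl : String × String) : List (List String) × List (List String) × List String × List String :=
  let cw := acc.2.2.1 ++ [wl.1]
  let cl := acc.2.2.2 ++ [wl.2]
  if wl.1 = "" ∧ wl.2 = "" then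
    (acc.1 ++ [cw], acc.2.1 ++ [cl], [], [])
  else
    (acc.1, acc.2.1, cw, cl)

def convert_to_sentence_level_alt (word_level_data : List (String × String)) : List (List String) × List (List String) :=
  let fin := word_level_data.foldl pvStepB ([], [], [], [])
  (fin.1, fin.2.1)

-- ===== PRECONDITION & SPEC =====
def Spec_convert_to_sentence_level (word_level_data : List (String × String)) (out : List (List String) × List (List String)) : Prop := out = convert_to_sentence_level_alt word_level_data
instance (word_level_data : List (String × String)) (out : List (List String) × List (List String)) : Decidable (Spec_convert_to_sentence_level word_level_data out) := by unfold Spec_convert_to_sentence_level; infer_instance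

-- ===== CLAIM (what is proved, stated in full; the proofs are below) =====
def Claim_equal_convert_to_sentence_level : Prop := ∀ (word_level_data : List (String × String)), Dom_convert_to_sentence_level word_level_data → Spec_convert_to_sentence_level word_level_data (convert_to_sentence_level word_level_data)

-- ===== LEMMAS AND PROOFS =====

-- taking one more element of a suffix picks up d[i]
theorem pv_take_succ (d : List (String × String)) (j i : Nat) (hji : j ≤ i)
    (w : String × String) (rs : List (String × String)) (hdrop : d.drop i = w :: rs) :
    (d.drop j).take (i + 1 - j) = (d.drop j).take (i - j) ++ [w] := by
  have hi : i < d.length := by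
    by_contra h
    have : d.drop i = [] := List.drop_eq_nil_of_le (by omega)
    simp [this] at hdrop
  have hget : (d.drop j)[i - j]? = some w := by
    rw [List.getElem?_drop]
    have : d[j + (i - j)]? = d[i]? := by congr 1; omega
    rw [this]
    have : d[i]? = (d.drop i)[0]? := by
      rw [List.getElem?_drop]; congr 1
    simp [hdrop] at this
    exact this
  have : i + 1 - j = (i - j) + 1 := by omega
  rw [this, List.take_add_one, hget]
  rfl

-- the joint loop invariant: A's fold over the enumerated suffix at offset i with cursor j
-- matches B's fold over the suffix with buffers = the already-seen slice d[j:i]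
theorem pv_inv (d : List (String × String)) :
    ∀ (rest : List (String × String)) (i j : Nat)
      (S L : List (List String)) ,
      j ≤ i → d.drop i = rest →
      let a := rest.foldl pvStepB
        (S, L, ((d.drop j).take (i - j)).map Prod.fst, ((d.drop j).take (i - j)).map Prod.snd)
      (PySem.List.enumerate rest (i : Int)).foldl (pvStepA d) (S, L, (j : Int)) =
        (a.1, a.2.1, (i + rest.length : Int)) ∨
      ((PySem.List.enumerate rest (i : Int)).foldl (pvStepA d) (S, L, (j : Int))).1 = a.1 ∧
      ((PySem.List.enumerate rest (i : Int)).foldl (pvStepA d) (S, L, (j : Int))).2.1 = a.2.1 := by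
  intro rest
  induction rest with
  | nil => intro i j S L _ _; right; simp [PySem.List.enumerate_nil]
  | cons w rs ih =>
    intro i j S L hji hdrop
    right
    rw [PySem.List.enumerate_cons]
    simp only [List.foldl_cons]
    by_cases hsep : w.1 = "" ∧ w.2 = ""
    · -- separator: A emits slice d[j:i+1]; B flushes its buffers
      have hi : i < d.length := by
        by_contra h
        have : d.drop i = [] := List.drop_eq_nil_of_le (by omega)
        simp [this] at hdrop
      have hslice : PySem.List.slice d (some (j : Int)) (some ((j : Int) + ((i : Int) - (j : Int)) + 1))
          = (d.drop j).take (i + 1 - j) := by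
        have h1 : (j : Int) + ((i : Int) - (j : Int)) + 1 = ((i + 1 : Nat) : Int) := by push_cast; ring
        rw [h1, PySem.List.slice_natCast]
      have htake := pv_take_succ d j i hji w rs hdrop
      have hA : pvStepA d (S, L, (j : Int)) ((i : Int), w)
          = (S ++ [((d.drop j).take (i + 1 - j)).map Prod.fst],
             L ++ [((d.drop j).take (i + 1 - j)).map Prod.snd], ((i : Int) + 1)) := by
        simp only [pvStepA]
        rw [if_pos hsep, hslice]
        simp only [PySem.List.pyGet?_neg_one_append_singleton, Option.getD_some]
        have hlen : (((d.drop j).take (i + 1 - j)).map Prod.fst).length = i + 1 - j := by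
          simp [List.length_take, List.length_drop]
          omega
        simp only [Prod.mk.injEq]
        refine ⟨trivial, trivial, ?_⟩
        rw [hlen]; omega
      have hB : pvStepB (S, L, ((d.drop j).take (i - j)).map Prod.fst, ((d.drop j).take (i - j)).map Prod.snd) w
          = (S ++ [((d.drop j).take (i + 1 - j)).map Prod.fst],
             L ++ [((d.drop j).take (i + 1 - j)).map Prod.snd], [], []) := by
        simp only [pvStepB, if_pos (And.intro hsep.1 hsep.2)]
        rw [htake]
        simp
      rw [hA, hB]
      have hdrop' : d.drop (i + 1) = rs := by
        rw [← List.drop_drop] at *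
        simp [hdrop]
      have := ih (i + 1) (i + 1)
        (S ++ [((d.drop j).take (i + 1 - j)).map Prod.fst])
        (L ++ [((d.drop j).take (i + 1 - j)).map Prod.snd])
        (le_refl _) hdrop'
      simp only [Nat.sub_self, List.take_zero, List.map_nil, Nat.cast_add, Nat.cast_one] at this
      rcases this with h | h
      · constructor
        · rw [h]
        · rw [h]
      · exact h
    · -- ordinary token: A's state unchanged; B extends its buffers
      have hA : pvStepA d (S, L, (j : Int)) ((i : Int), w) = (S, L, (j : Int)) := by
        simp only [pvStepA, if_neg hsep]
      have htake := pv_take_succ d j i hji w rs hdrop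
      have hB : pvStepB (S, L, ((d.drop j).take (i - j)).map Prod.fst, ((d.drop j).take (i - j)).map Prod.snd) w
          = (S, L, ((d.drop j).take (i + 1 - j)).map Prod.fst, ((d.drop j).take (i + 1 - j)).map Prod.snd) := by
        simp only [pvStepB, if_neg hsep]
        rw [htake]
        simp
      rw [hA, hB]
      have hdrop' : d.drop (i + 1) = rs := by
        rw [← List.drop_drop] at *
        simp [hdrop]
      have := ih (i + 1) j S L (by omega) hdrop'
      simp only [Nat.cast_add, Nat.cast_one] at this
      rcases this with h | h
      · constructor
        · rw [h]
        · rw [h]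
      · exact h

-- ===== VERDICT (by name: the statement is the Claim_ definition above) =====
theorem convert_to_sentence_level_spec : Claim_equal_convert_to_sentence_level := by
  intro d _
  unfold Spec_convert_to_sentence_level convert_to_sentence_level convert_to_sentence_level_alt
  have := pv_inv d d 0 0 [] [] (le_refl _) rfl
  simp only [List.drop_zero, Nat.sub_zero, List.take_zero, List.map_nil, Nat.cast_zero] at this
  rcases this with h | h
  · rw [h]
  · exact Prod.ext h.1 h.2
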